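-- pv_equiv track=rewrite | github.com/jinha2536/mdm-arithmetic | diffusion-arithmetic/experiments/exp_maze.py | compute_junction_count
-- ===== SOURCE A (Python) =====
-- def _open_neighbors(grid, ci, H, W):
--     """Count open (non-wall) neighbors of cell ci."""
--     r, c = ci // W, ci % W
--     count = 0
--     for dr, dc in [(0, 1), (0, -1), (1, 0), (-1, 0)]:
--         nr, nc = r + dr, c + dc
--         if 0 <= nr < H and 0 <= nc < W and grid[nr * W + nc] != '#':
--             count += 1
--     return count
--
-- def compute_junction_count(grid, H, W):
--     """Count total junctions (open cells with ≥3 open neighbors) in the maze."""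
--     count = 0
--     for i in range(H * W):
--         if grid[i] == '#':
--             continue
--         if _open_neighbors(grid, i, H, W) >= 3:
--             count += 1
--     return count
-- ===== SOURCE B (Python) =====
-- def _edge_targets(grid, i, n, W):
--     """Cells whose open-neighbor degree the adjacencies rooted at cell i bump."""
--     targets = []
--     if (i + 1) % W != 0:          # right adjacency (i, i+1) exists
--         if grid[i + 1] != '#':
--             targets.append(i)
--         if grid[i] != '#':
--             targets.append(i + 1)
--     if i + W < n:                 # down adjacency (i, i+W) exists
--         if grid[i + W] != '#':
--             targets.append(i)
--         if grid[i] != '#':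
--             targets.append(i + W)
--     return targets
--
-- def compute_junction_count(grid, H, W):
--     """Count total junctions (open cells with >=3 open neighbors) in the maze."""
--     if H <= 0 or W <= 0:
--         return 0
--     n = H * W
--     deg = {}
--     for i in range(n):
--         for j in _edge_targets(grid, i, n, W):
--             deg[j] = deg.get(j, 0) + 1
--     count = 0
--     for i in range(n):
--         if grid[i] != '#' and deg.get(i, 0) >= 3:
--             count += 1
--     return count
-- ===== Notes on version B (the rewrite author's own statement) =====
-- stated objective: alternative
-- what changed: A probes, for each open cell, its 4 neighbors on demand via flat-index divmod; B instead sweeps the undirected right/down adjacencies once, symmetrically bumping a dict-based degree counter at both endpoints of each adjacency, and then counts open cells with degree >= 3 in a separate pass.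
import Mathlib
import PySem

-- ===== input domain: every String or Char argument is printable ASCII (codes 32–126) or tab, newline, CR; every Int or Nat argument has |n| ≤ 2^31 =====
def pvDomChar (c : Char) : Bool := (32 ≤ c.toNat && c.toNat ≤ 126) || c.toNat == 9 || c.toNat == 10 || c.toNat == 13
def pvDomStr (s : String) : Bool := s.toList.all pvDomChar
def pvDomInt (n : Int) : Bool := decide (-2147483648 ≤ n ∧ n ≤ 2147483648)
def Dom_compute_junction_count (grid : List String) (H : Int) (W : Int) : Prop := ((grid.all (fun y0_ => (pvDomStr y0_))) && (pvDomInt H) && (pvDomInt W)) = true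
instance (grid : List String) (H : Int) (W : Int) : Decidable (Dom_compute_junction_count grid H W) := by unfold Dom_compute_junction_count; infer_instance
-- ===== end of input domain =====

-- B replaces A's per-open-cell probing of the 4 neighbors (flat-index divmod) by a sweep
-- over the undirected right/down adjacencies that bumps a dict degree counter at both
-- endpoints, followed by a counting pass (objective: alternative algorithm, same cost).

-- ===== PORT A =====
def pv_openNeighbors (grid : List String) (ci : Int) (H : Int) (W : Int) : Int :=
  let r := PySem.Int.floordiv ci W
  let c := PySem.Int.mod ci W
  ([((0:Int),(1:Int)), (0,-1), (1,0), (-1,0)]).foldl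
    (fun count d =>
      let nr := r + d.1
      let nc := c + d.2
      if 0 ≤ nr ∧ nr < H ∧ 0 ≤ nc ∧ nc < W ∧ PySem.List.pyGetD grid (nr*W+nc) "" ≠ "#" then
        count + 1
      else count) 0

def compute_junction_count (grid : List String) (H : Int) (W : Int) : Int :=
  (PySem.List.pyRange 0 (H*W) 1).foldl
    (fun count i =>
      if PySem.List.pyGetD grid i "" = "#" then count
      else if pv_openNeighbors grid i H W ≥ 3 then count + 1
      else count) 0

-- ===== PORT B =====
-- cells whose open-neighbor degree the adjacencies rooted at cell i bump (Python _edge_targets)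
def pv_edgeTargets (grid : List String) (i : Int) (n : Int) (W : Int) : List Int :=
  ((if PySem.Int.mod (i+1) W ≠ 0 ∧ PySem.List.pyGetD grid (i+1) "" ≠ "#" then [i] else []) ++
   (if PySem.Int.mod (i+1) W ≠ 0 ∧ PySem.List.pyGetD grid i "" ≠ "#" then [i+1] else [])) ++
  ((if i + W < n ∧ PySem.List.pyGetD grid (i+W) "" ≠ "#" then [i] else []) ++
   (if i + W < n ∧ PySem.List.pyGetD grid i "" ≠ "#" then [i+W] else []))

-- the dict built by the edge sweep: deg[j] = deg.get(j, 0) + 1 for each bumped endpoint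
def pv_degDict (grid : List String) (n : Int) (W : Int) : PySem.Dict Int Int :=
  (PySem.List.pyRange 0 n 1).foldl
    (fun d i => (pv_edgeTargets grid i n W).foldl
      (fun d j => d.insert j (d.getD j 0 + 1)) d)
    PySem.Dict.empty

def compute_junction_count_alt (grid : List String) (H : Int) (W : Int) : Int :=
  if H ≤ 0 ∨ W ≤ 0 then 0 else
  (PySem.List.pyRange 0 (H*W) 1).foldl
    (fun count i =>
      if PySem.List.pyGetD grid i "" ≠ "#" ∧ (pv_degDict grid (H*W) W).getD i 0 ≥ 3 then
        count + 1
      else count) 0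

-- ===== PRECONDITION & SPEC =====
-- Pre_ excludes exactly the inputs where Python A raises IndexError: a positive cell
-- count H*W exceeding the length of grid (then grid[i] is out of range for some i).
def Pre_compute_junction_count (grid : List String) (H : Int) (W : Int) : Prop :=
  0 < H * W → H * W ≤ grid.length
instance (grid : List String) (H : Int) (W : Int) : Decidable (Pre_compute_junction_count grid H W) := by unfold Pre_compute_junction_count; infer_instance

def pvWitness_compute_junction_count : List String × Int × Int :=
  (["#", ".", ".", ".", ".", "."], 2, 3)

def Spec_compute_junction_count (grid : List String) (H : Int) (W : Int) (out : Int) : Prop := out = compute_junction_count_alt grid H W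
instance (grid : List String) (H : Int) (W : Int) (out : Int) : Decidable (Spec_compute_junction_count grid H W out) := by unfold Spec_compute_junction_count; infer_instance

-- ===== CLAIM (what is proved, stated in full; the proofs are below) =====
def Claim_equal_compute_junction_count : Prop := ∀ (grid : List String) (H : Int) (W : Int), Dom_compute_junction_count grid H W → Pre_compute_junction_count grid H W → Spec_compute_junction_count grid H W (compute_junction_count grid H W)

-- ===== LEMMAS AND PROOFS =====

-- the degree dict looks up as an occurrence count over the concatenated target lists
lemma pv_degDict_getD (grid : List String) (n W k : Int) :
    (pv_degDict grid n W).getD k 0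
      = (((PySem.List.pyRange 0 n 1).flatMap (fun i => pv_edgeTargets grid i n W)).count k : Int) := by
  unfold pv_degDict
  rw [← List.foldl_flatMap, PySem.Dict.getD_foldl_insert_add_one]
  simp

-- count in a flatMap is the sum of the per-element counts
lemma pv_count_flatMap (l : List Int) (f : Int → List Int) (a : Int) :
    (l.flatMap f).count a = (l.map fun x => (f x).count a).sum := by
  induction l with
  | nil => simp
  | cons x t ih => simp [List.count_append, ih]

-- count of a conditional singleton
lemma pv_count_if_single (P : Prop) [Decidable P] (a b : Int) :
    (if P then [a] else []).count b = if P ∧ a = b then 1 else 0 := by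
  split_ifs with h1 h2 <;> simp_all

-- a sum over a duplicate-free list of a function supported at one point
lemma pv_sum_point (f : Int → Nat) (t : Int) (hf : ∀ i, i ≠ t → f i = 0) :
    ∀ l : List Int, l.Nodup → (l.map f).sum = if t ∈ l then f t else 0 := by
  intro l
  induction l with
  | nil => simp
  | cons x xs ih =>
    intro hnd
    rw [List.nodup_cons] at hnd
    simp only [List.map_cons, List.sum_cons, ih hnd.2, List.mem_cons]
    by_cases hxt : x = t
    · subst hxt
      simp [hnd.1]
    · rw [hf x hxt]
      by_cases hm : t ∈ xs <;> simp [hm, Ne.symm hxt]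

-- per-source decomposition of the bump targets' count
lemma pv_targets_count (grid : List String) (n W i k : Int) :
    (pv_edgeTargets grid i n W).count k
    = (if (PySem.Int.mod (i+1) W ≠ 0 ∧ PySem.List.pyGetD grid (i+1) "" ≠ "#") ∧ i = k then 1 else 0)
    + (if (PySem.Int.mod (i+1) W ≠ 0 ∧ PySem.List.pyGetD grid i "" ≠ "#") ∧ i + 1 = k then 1 else 0)
    + (if (i + W < n ∧ PySem.List.pyGetD grid (i+W) "" ≠ "#") ∧ i = k then 1 else 0)
    + (if (i + W < n ∧ PySem.List.pyGetD grid i "" ≠ "#") ∧ i + W = k then 1 else 0) := by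
  unfold pv_edgeTargets
  rw [List.count_append, List.count_append, List.count_append,
      pv_count_if_single, pv_count_if_single, pv_count_if_single, pv_count_if_single]
  ring

-- the edge sweep accumulates, at each cell of the grid, A's open-neighbor count
lemma pv_count_eq_open (grid : List String) (H W k : Int) (hW : 0 < W)
    (h0 : 0 ≤ k) (hk : k < H * W) :
    ((((PySem.List.pyRange 0 (H*W) 1).flatMap (fun i => pv_edgeTargets grid i (H*W) W)).count k : Nat) : Int)
      = pv_openNeighbors grid k H W := by
  set r := PySem.Int.floordiv k W with hr
  set c := PySem.Int.mod k W with hc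
  have hr0 : 0 ≤ r := by
    rw [hr]
    rcases (PySem.Int.floordiv_eq_iff_of_pos hW (a := k) (q := PySem.Int.floordiv k W)).mp rfl with ⟨h1, h2⟩
    nlinarith
  have hrH : r < H := by
    rw [hr, PySem.Int.floordiv_lt_iff_lt_mul hW]
    linarith [mul_comm H W]
  have hc0 : 0 ≤ c := PySem.Int.mod_nonneg k hW
  have hcW : c < W := PySem.Int.mod_lt k hW
  have hkrc : r * W + c = k := PySem.Int.floordiv_mul_add_mod k W
  -- the four condition translations
  have hm1 : PySem.Int.mod (k+1) W ≠ 0 ↔ c + 1 < W := by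
    have hmod : PySem.Int.mod (k+1) W = if c + 1 < W then c+1 else 0 := by
      by_cases hcase : c + 1 < W
      · have hfd : PySem.Int.floordiv (k+1) W = r := by
          rw [PySem.Int.floordiv_eq_iff_of_pos hW]
          have e : (r+1)*W = r*W + W := by ring
          constructor <;> nlinarith
        have h2 := PySem.Int.floordiv_mul_add_mod (k+1) W
        rw [hfd] at h2
        rw [if_pos hcase]; linarith
      · have hfd : PySem.Int.floordiv (k+1) W = r + 1 := by
          rw [PySem.Int.floordiv_eq_iff_of_pos hW]
          have e : (r+1)*W = r*W + W := by ring
          have e2 : (r+1+1)*W = r*W + 2*W := by ring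
          constructor <;> nlinarith
        have h2 := PySem.Int.floordiv_mul_add_mod (k+1) W
        rw [hfd] at h2
        have e : (r+1)*W = r*W + W := by ring
        rw [if_neg hcase]; linarith
    constructor
    · intro h; by_contra hc2; rw [hmod, if_neg hc2] at h; exact h rfl
    · intro h hzero; rw [hmod, if_pos h] at hzero; omega
  have hq1 : 1 ≤ c → 1 ≤ k := by
    intro h; nlinarith [mul_nonneg hr0 hW.le]
  have hq3 : k + W < H*W ↔ r + 1 < H := by
    constructor
    · intro h
      by_contra hcon
      have hcon' : H ≤ r + 1 := by omega
      have h2 := mul_le_mul_of_nonneg_right hcon' hW.le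
      nlinarith
    · intro h
      have h1 : r + 1 ≤ H - 1 := by omega
      have h2 := mul_le_mul_of_nonneg_right h1 hW.le
      nlinarith
  have hq4 : 0 ≤ k - W ↔ 1 ≤ r := by
    constructor
    · intro h
      by_contra hcon
      have hr00 : r = 0 := by omega
      rw [hr00] at hkrc
      nlinarith
    · intro h
      have h2 := mul_le_mul_of_nonneg_right (show (0:Int) ≤ r-1 by omega) hW.le
      nlinarith
  -- point supports of the four summands
  have hf1 : ∀ i : Int, i ≠ k →
      (if (PySem.Int.mod (i+1) W ≠ 0 ∧ PySem.List.pyGetD grid (i+1) "" ≠ "#") ∧ i = k then (1:Nat) else 0) = 0 := by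
    intro i hne; rw [if_neg]; rintro ⟨-, h⟩; omega
  have hf2 : ∀ i : Int, i ≠ k - 1 →
      (if (PySem.Int.mod (i+1) W ≠ 0 ∧ PySem.List.pyGetD grid i "" ≠ "#") ∧ i + 1 = k then (1:Nat) else 0) = 0 := by
    intro i hne; rw [if_neg]; rintro ⟨-, h⟩; omega
  have hf3 : ∀ i : Int, i ≠ k →
      (if (i + W < H*W ∧ PySem.List.pyGetD grid (i+W) "" ≠ "#") ∧ i = k then (1:Nat) else 0) = 0 := by
    intro i hne; rw [if_neg]; rintro ⟨-, h⟩; omega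
  have hf4 : ∀ i : Int, i ≠ k - W →
      (if (i + W < H*W ∧ PySem.List.pyGetD grid i "" ≠ "#") ∧ i + W = k then (1:Nat) else 0) = 0 := by
    intro i hne; rw [if_neg]; rintro ⟨-, h⟩; omega
  rw [pv_count_flatMap]
  simp only [pv_targets_count]
  rw [List.sum_map_add, List.sum_map_add, List.sum_map_add]
  rw [pv_sum_point _ k hf1 _ (PySem.List.nodup_pyRange_one _ _),
      pv_sum_point _ (k-1) hf2 _ (PySem.List.nodup_pyRange_one _ _),
      pv_sum_point _ k hf3 _ (PySem.List.nodup_pyRange_one _ _),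
      pv_sum_point _ (k-W) hf4 _ (PySem.List.nodup_pyRange_one _ _)]
  simp only [PySem.List.mem_pyRange_one, sub_add_cancel, and_true, ← hc, ← ite_and]
  have hT1 : ((0 ≤ k ∧ k < H*W) ∧ ((PySem.Int.mod (k+1) W ≠ 0 ∧ PySem.List.pyGetD grid (k+1) "" ≠ "#")))
      ↔ (c + 1 < W ∧ PySem.List.pyGetD grid (k+1) "" ≠ "#") := by
    rw [hm1]
    constructor
    · rintro ⟨-, h1, h2⟩; exact ⟨h1, h2⟩
    · rintro ⟨h1, h2⟩; exact ⟨⟨h0, hk⟩, h1, h2⟩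
  have hT2 : ((0 ≤ k - 1 ∧ k - 1 < H*W) ∧ ((c ≠ 0 ∧ PySem.List.pyGetD grid (k-1) "" ≠ "#")))
      ↔ (0 ≤ c - 1 ∧ PySem.List.pyGetD grid (k-1) "" ≠ "#") := by
    constructor
    · rintro ⟨⟨h1, h2⟩, h3, h4⟩; exact ⟨by omega, h4⟩
    · rintro ⟨h1, h4⟩
      have hk1 : 1 ≤ k := hq1 (by omega)
      exact ⟨⟨by omega, by omega⟩, by omega, h4⟩
  have hT3 : ((0 ≤ k ∧ k < H*W) ∧ ((k + W < H*W ∧ PySem.List.pyGetD grid (k+W) "" ≠ "#")))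
      ↔ (r + 1 < H ∧ PySem.List.pyGetD grid (k+W) "" ≠ "#") := by
    constructor
    · rintro ⟨-, h3, h4⟩; exact ⟨hq3.mp h3, h4⟩
    · rintro ⟨h3, h4⟩; exact ⟨⟨h0, hk⟩, hq3.mpr h3, h4⟩
  have hT4 : ((0 ≤ k - W ∧ k - W < H*W) ∧ ((k < H*W ∧ PySem.List.pyGetD grid (k-W) "" ≠ "#")))
      ↔ (0 ≤ r - 1 ∧ PySem.List.pyGetD grid (k-W) "" ≠ "#") := by
    constructor
    · rintro ⟨⟨h1, -⟩, -, h4⟩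
      have := hq4.mp h1
      exact ⟨by omega, h4⟩
    · rintro ⟨h1, h4⟩
      have := hq4.mpr (by omega)
      exact ⟨⟨by omega, by omega⟩, hk, h4⟩
  simp only [hT1, hT2, hT3, hT4]
  -- now evaluate A's on-demand probe into the same four conditions
  unfold pv_openNeighbors
  simp only [List.foldl, ← hr, ← hc]
  have e1 : ∀ P : Prop, (0 ≤ r + 0 ∧ r + 0 < H ∧ 0 ≤ c + 1 ∧ c + 1 < W ∧ P) ↔ (c + 1 < W ∧ P) := by
    intro P; constructor
    · rintro ⟨-, -, -, h, p⟩; exact ⟨h, p⟩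
    · rintro ⟨h, p⟩; exact ⟨by omega, by omega, by omega, h, p⟩
  have e2 : ∀ P : Prop, (0 ≤ r + 0 ∧ r + 0 < H ∧ 0 ≤ c + -1 ∧ c + -1 < W ∧ P) ↔ (0 ≤ c - 1 ∧ P) := by
    intro P; constructor
    · rintro ⟨-, -, h, -, p⟩; exact ⟨by omega, p⟩
    · rintro ⟨h, p⟩; exact ⟨by omega, by omega, by omega, by omega, p⟩
  have e3 : ∀ P : Prop, (0 ≤ r + 1 ∧ r + 1 < H ∧ 0 ≤ c + 0 ∧ c + 0 < W ∧ P) ↔ (r + 1 < H ∧ P) := by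
    intro P; constructor
    · rintro ⟨-, h, -, -, p⟩; exact ⟨h, p⟩
    · rintro ⟨h, p⟩; exact ⟨by omega, h, by omega, by omega, p⟩
  have e4 : ∀ P : Prop, (0 ≤ r + -1 ∧ r + -1 < H ∧ 0 ≤ c + 0 ∧ c + 0 < W ∧ P) ↔ (0 ≤ r - 1 ∧ P) := by
    intro P; constructor
    · rintro ⟨h, -, -, -, p⟩; exact ⟨by omega, p⟩
    · rintro ⟨h, p⟩; exact ⟨by omega, by omega, by omega, by omega, p⟩
  have i1 : (r + 0) * W + (c + 1) = k + 1 := by rw [← hkrc]; ring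
  have i2 : (r + 0) * W + (c + -1) = k - 1 := by rw [← hkrc]; ring
  have i3 : (r + 1) * W + (c + 0) = k + W := by rw [← hkrc]; ring
  have i4 : (r + -1) * W + (c + 0) = k - W := by rw [← hkrc]; ring
  rw [i1, i2, i3, i4]
  simp only [e1, e2, e3, e4]
  by_cases p1 : c + 1 < W ∧ PySem.List.pyGetD grid (k+1) "" ≠ "#" <;>
  by_cases p2 : 0 ≤ c - 1 ∧ PySem.List.pyGetD grid (k-1) "" ≠ "#" <;>
  by_cases p3 : r + 1 < H ∧ PySem.List.pyGetD grid (k+W) "" ≠ "#" <;>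
  by_cases p4 : 0 ≤ r - 1 ∧ PySem.List.pyGetD grid (k-W) "" ≠ "#" <;>
  simp [p1, p2, p3, p4] <;> (try split_ifs) <;> omega

-- B returns 0 when a dimension is nonpositive (the early return)
lemma pv_alt_zero (grid : List String) (H W : Int) (h : H ≤ 0 ∨ W ≤ 0) :
    compute_junction_count_alt grid H W = 0 := by
  unfold compute_junction_count_alt
  rw [if_pos h]

-- A returns 0 for a nonpositive cell count (empty flat range)
lemma pv_a_zero (grid : List String) (H W : Int) (h : H * W ≤ 0) :
    compute_junction_count grid H W = 0 := by
  unfold compute_junction_count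
  rw [PySem.List.pyRange_one_eq_nil h]
  rfl

-- with negative H, no neighbor test can fire, so A counts nothing
lemma pv_a_zero_neg (grid : List String) (H W : Int) (hH : H < 0) :
    compute_junction_count grid H W = 0 := by
  unfold compute_junction_count
  have hno : ∀ (x : Int) (P : Prop), ¬ (0 ≤ x ∧ x < H ∧ P) := by
    rintro x P ⟨a, b, -⟩; omega
  have hopen : ∀ i : Int, pv_openNeighbors grid i H W = 0 := by
    intro i
    unfold pv_openNeighbors
    simp only [List.foldl]
    rw [if_neg (hno _ _), if_neg (hno _ _), if_neg (hno _ _), if_neg (hno _ _)]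
  have hstep := PySem.List.foldl_congr_mem
    (l := PySem.List.pyRange 0 (H*W) 1) (init := (0:Int))
    (f := fun count i =>
      if PySem.List.pyGetD grid i "" = "#" then count
      else if pv_openNeighbors grid i H W ≥ 3 then count + 1
      else count)
    (g := fun count _ => count)
    (by intro count i _
        by_cases h : PySem.List.pyGetD grid i "" = "#" <;> simp [h, hopen i])
  rw [hstep, PySem.List.foldl_ignore]

-- ===== VERDICT (by name: the statement is the Claim_ definition above) =====
theorem compute_junction_count_spec : Claim_equal_compute_junction_count := by
  intro grid H W _ _
  unfold Spec_compute_junction_count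
  by_cases hH : 0 < H
  · by_cases hW : 0 < W
    · -- main case: positive grid dimensions
      rw [compute_junction_count_alt, if_neg (by rintro (h|h) <;> omega)]
      unfold compute_junction_count
      have hstepA := PySem.List.foldl_congr_mem
        (l := PySem.List.pyRange 0 (H*W) 1) (init := (0:Int))
        (f := fun count i =>
          if PySem.List.pyGetD grid i "" = "#" then count
          else if pv_openNeighbors grid i H W ≥ 3 then count + 1
          else count)
        (g := fun count i =>
          if PySem.List.pyGetD grid i "" ≠ "#" ∧ pv_openNeighbors grid i H W ≥ 3 then count + 1
          else count)
        (by intro count i _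
            by_cases hsh : PySem.List.pyGetD grid i "" = "#" <;>
              by_cases h2 : pv_openNeighbors grid i H W ≥ 3 <;> simp [hsh, h2])
      rw [hstepA]
      apply PySem.List.foldl_congr_mem
      intro count i hi
      have hmem := (PySem.List.mem_pyRange_one).mp hi
      have hdeg : (pv_degDict grid (H*W) W).getD i 0 = pv_openNeighbors grid i H W := by
        rw [pv_degDict_getD]
        exact pv_count_eq_open grid H W i hW (by omega) (by omega)
      rw [hdeg]
    · -- W ≤ 0: both sides are 0
      have hW' : W ≤ 0 := by omega
      rw [pv_a_zero grid H W (by nlinarith), pv_alt_zero grid H W (Or.inr hW')]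
  · -- H ≤ 0: B's outer loop is empty; A is 0 whether H*W ≤ 0 or H,W both negative
    have hH' : H ≤ 0 := by omega
    rw [pv_alt_zero grid H W (Or.inl hH')]
    by_cases hHW : H * W ≤ 0
    · exact pv_a_zero grid H W hHW
    · have : H < 0 := by
        rcases lt_or_eq_of_le hH' with h | h
        · exact h
        · exfalso; rw [h] at hHW; simp at hHW
      exact pv_a_zero_neg grid H W this
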